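-- pv_equiv track=rewrite | github.com/draeve/10-Fast-Honks | main.py | checkingStats
-- ===== SOURCE A (Python) =====
-- def checkingStats(wordList, inputRows): #spits out information (integers) for the STAT page, pulls information from the Typing Test, so is techincally stil a part of it
--     keyStrokes = 0
--     correctKeyStrokes = 0
--     incorrectKeyStrokes = 0
--     correctWords = 0
--     incorrectWords = 0
--     for a,b in zip(wordList, inputRows): #just the actual words, and if they match the ones in the list
--         if a == b:
--             correctWords += 1
--         else:
--             incorrectWords += 1
--         for c in range(min(len(a),len(b))): #checking the individual word characters
--             if b[c].isupper():
--                 keyStrokes += 2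
--             elif b[c].islower():
--                 keyStrokes += 1
--             if a[c] == b[c]:
--                 correctKeyStrokes += 1
--             else:
--                 incorrectKeyStrokes += 1
--     return keyStrokes, correctKeyStrokes, incorrectKeyStrokes, correctWords, incorrectWords
-- ===== SOURCE B (Python) =====
-- def checkingStats(wordList, inputRows):
--     # Separate reductions instead of one fused nested loop.
--     pairs = list(zip(wordList, inputRows))
--     correctWords = sum(1 for a, b in pairs if a == b)
--     incorrectWords = len(pairs) - correctWords
--     cmp = [(x, y) for a, b in pairs for x, y in zip(a, b)]
--     keyStrokes = sum(2 if y.isupper() else (1 if y.islower() else 0) for _, y in cmp)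
--     correctKeyStrokes = sum(1 for x, y in cmp if x == y)
--     incorrectKeyStrokes = len(cmp) - correctKeyStrokes
--     return keyStrokes, correctKeyStrokes, incorrectKeyStrokes, correctWords, incorrectWords
-- ===== Notes on version B (the rewrite author's own statement) =====
-- stated objective: alternative
-- what changed: The single fused nested loop with five running counters is replaced by independent reductions: a countP over the word pairs for correct words, and sums/counts over the flattened list of compared character pairs for keystrokes and correct characters, with both 'incorrect' counts derived as totals minus corrects.
import Mathlib
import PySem

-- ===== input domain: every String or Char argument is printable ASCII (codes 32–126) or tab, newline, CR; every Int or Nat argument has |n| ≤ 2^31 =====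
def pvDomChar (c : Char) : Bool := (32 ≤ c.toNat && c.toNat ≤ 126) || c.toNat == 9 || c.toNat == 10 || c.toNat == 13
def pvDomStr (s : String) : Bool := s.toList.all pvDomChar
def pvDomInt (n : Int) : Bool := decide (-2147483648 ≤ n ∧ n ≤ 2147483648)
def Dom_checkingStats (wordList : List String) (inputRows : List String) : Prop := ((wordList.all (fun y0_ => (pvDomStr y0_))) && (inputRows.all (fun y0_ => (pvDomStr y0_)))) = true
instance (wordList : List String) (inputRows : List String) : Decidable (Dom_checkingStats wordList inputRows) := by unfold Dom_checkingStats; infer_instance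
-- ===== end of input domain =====

-- B replaces A's fused nested loop over five running counters by separate reductions
-- (a count over the word pairs and sums/counts over the flattened compared-character pairs); same cost.

-- ===== PORT A =====
-- the body of A's outer 'for a, b in zip(...)' loop, carrying (keyStrokes, correctKeyStrokes,
-- incorrectKeyStrokes, correctWords, incorrectWords); the inner loop runs over
-- range(min(len(a), len(b))) and indexes both strings (always in range, so pyGetD's default is never used)
def checkingStatsBody (st : Int × Int × Int × Int × Int) (ab : String × String) :
    Int × Int × Int × Int × Int :=
  let a := ab.1
  let b := ab.2
  let cw := if a == b then st.2.2.2.1 + 1 else st.2.2.2.1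
  let iw := if a == b then st.2.2.2.2 else st.2.2.2.2 + 1
  let inner :=
    (PySem.List.pyRange 0 (min (PySem.Str.len a) (PySem.Str.len b)) 1).foldl
      (fun (t : Int × Int × Int) c =>
        let bc := PySem.List.pyGetD b.toList c ' '
        let ac := PySem.List.pyGetD a.toList c ' '
        let ks := if PySem.Chars.isupper bc then t.1 + 2
                  else if PySem.Chars.islower bc then t.1 + 1 else t.1
        let cks := if ac == bc then t.2.1 + 1 else t.2.1
        let iks := if ac == bc then t.2.2 else t.2.2 + 1
        (ks, cks, iks))
      (st.1, st.2.1, st.2.2.1)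
  (inner.1, inner.2.1, inner.2.2, cw, iw)

def checkingStats (wordList : List String) (inputRows : List String) : Int × Int × Int × Int × Int :=
  (wordList.zip inputRows).foldl checkingStatsBody (0, 0, 0, 0, 0)

-- ===== PORT B =====
-- port of Source B: independent reductions over the pair list and the flattened compared-character list
def checkingStats_alt (wordList : List String) (inputRows : List String) : Int × Int × Int × Int × Int :=
  let pairs := wordList.zip inputRows
  let correctWords : Int := pairs.countP (fun ab => ab.1 == ab.2)
  let incorrectWords : Int := (pairs.length : Int) - correctWords
  let cmp := pairs.flatMap (fun ab => ab.1.toList.zip ab.2.toList)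
  let keyStrokes : Int :=
    (cmp.map (fun xy => if PySem.Chars.isupper xy.2 then (2 : Int)
                        else if PySem.Chars.islower xy.2 then 1 else 0)).sum
  let correctKeyStrokes : Int := cmp.countP (fun xy => xy.1 == xy.2)
  let incorrectKeyStrokes : Int := (cmp.length : Int) - correctKeyStrokes
  (keyStrokes, correctKeyStrokes, incorrectKeyStrokes, correctWords, incorrectWords)

-- ===== PRECONDITION & SPEC =====
def Spec_checkingStats (wordList : List String) (inputRows : List String) (out : Int × Int × Int × Int × Int) : Prop := out = checkingStats_alt wordList inputRows
instance (wordList : List String) (inputRows : List String) (out : Int × Int × Int × Int × Int) : Decidable (Spec_checkingStats wordList inputRows out) := by unfold Spec_checkingStats; infer_instance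

-- ===== CLAIM (what is proved, stated in full; the proofs are below) =====
def Claim_equal_checkingStats : Prop := ∀ (wordList : List String) (inputRows : List String), Dom_checkingStats wordList inputRows → Spec_checkingStats wordList inputRows (checkingStats wordList inputRows)

-- ===== LEMMAS AND PROOFS =====

-- keystroke weight of one compared character pair (2 for uppercase, 1 for lowercase, else 0)
def pvW (xy : Char × Char) : Int :=
  if PySem.Chars.isupper xy.2 then 2 else if PySem.Chars.islower xy.2 then 1 else 0

theorem pv_inner_fold (cs : List (Char × Char)) (t : Int × Int × Int) :
    cs.foldl (fun (t : Int × Int × Int) p =>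
        (if PySem.Chars.isupper p.2 then t.1 + 2 else if PySem.Chars.islower p.2 then t.1 + 1 else t.1,
         if p.1 == p.2 then t.2.1 + 1 else t.2.1,
         if p.1 == p.2 then t.2.2 else t.2.2 + 1)) t
    = (t.1 + (cs.map pvW).sum,
       t.2.1 + (cs.countP (fun p => p.1 == p.2) : Int),
       t.2.2 + ((cs.length : Int) - (cs.countP (fun p => p.1 == p.2) : Int))) := by
  induction cs generalizing t with
  | nil => simp
  | cons c cs ih =>
    simp only [List.foldl_cons, ih, List.map_cons, List.sum_cons, List.countP_cons, List.length_cons, pvW]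
    refine Prod.ext ?_ (Prod.ext ?_ ?_) <;> simp <;> split_ifs <;> ring

theorem pv_pair_step (a b : String) (t : Int × Int × Int) :
    (PySem.List.pyRange 0 (min (PySem.Str.len a) (PySem.Str.len b)) 1).foldl
      (fun (t : Int × Int × Int) c =>
        let bc := PySem.List.pyGetD b.toList c ' '
        let ac := PySem.List.pyGetD a.toList c ' '
        let ks := if PySem.Chars.isupper bc then t.1 + 2
                  else if PySem.Chars.islower bc then t.1 + 1 else t.1
        let cks := if ac == bc then t.2.1 + 1 else t.2.1
        let iks := if ac == bc then t.2.2 else t.2.2 + 1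
        (ks, cks, iks)) t
    = (t.1 + ((a.toList.zip b.toList).map pvW).sum,
       t.2.1 + ((a.toList.zip b.toList).countP (fun p => p.1 == p.2) : Int),
       t.2.2 + (((a.toList.zip b.toList).length : Int)
                 - ((a.toList.zip b.toList).countP (fun p => p.1 == p.2) : Int))) := by
  have hlen : min (PySem.Str.len a) (PySem.Str.len b) = ((a.toList.zip b.toList).length : Int) := by
    simp [List.length_zip]
  rw [hlen]
  rw [PySem.List.foldl_congr_mem
        (g := fun (t : Int × Int × Int) c =>
          (fun (t : Int × Int × Int) (p : Char × Char) =>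
            (if PySem.Chars.isupper p.2 then t.1 + 2 else if PySem.Chars.islower p.2 then t.1 + 1 else t.1,
             if p.1 == p.2 then t.2.1 + 1 else t.2.1,
             if p.1 == p.2 then t.2.2 else t.2.2 + 1)) t
            (PySem.List.pyGetD (a.toList.zip b.toList) c (' ', ' ')))]
  · exact (PySem.List.foldl_pyRange_zero_pyGetD' (a.toList.zip b.toList) (' ', ' ')
      (fun (t : Int × Int × Int) (p : Char × Char) =>
            (if PySem.Chars.isupper p.2 then t.1 + 2 else if PySem.Chars.islower p.2 then t.1 + 1 else t.1,
             if p.1 == p.2 then t.2.1 + 1 else t.2.1,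
             if p.1 == p.2 then t.2.2 else t.2.2 + 1)) t).trans (pv_inner_fold _ t)
  · intro acc c hc
    rw [PySem.List.mem_pyRange_one] at hc
    have hz := hc.2
    simp only [List.length_zip, Nat.cast_min] at hz
    have hza : c < (a.toList.length : Int) := by omega
    have hzb : c < (b.toList.length : Int) := by omega
    rw [PySem.List.pyGetD_eq_getElem (h0 := hc.1) (h1 := by omega),
        PySem.List.pyGetD_eq_getElem (h0 := hc.1) (h1 := by omega),
        PySem.List.pyGetD_eq_getElem (h0 := hc.1) (h1 := by simp only [List.length_zip, Nat.cast_min]; omega),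
        List.getElem_zip]

-- per-pair contributions: keystrokes, correct characters, compared length
def pvK (ab : String × String) : Int := ((ab.1.toList.zip ab.2.toList).map pvW).sum
def pvC (ab : String × String) : Int := ((ab.1.toList.zip ab.2.toList).countP (fun p => p.1 == p.2) : Int)
def pvL (ab : String × String) : Int := ((ab.1.toList.zip ab.2.toList).length : Int)

theorem pv_body (st : Int × Int × Int × Int × Int) (ab : String × String) :
    checkingStatsBody st ab
    = (st.1 + pvK ab,
       st.2.1 + pvC ab,
       st.2.2.1 + (pvL ab - pvC ab),
       st.2.2.2.1 + (if ab.1 == ab.2 then 1 else 0),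
       st.2.2.2.2 + (if ab.1 == ab.2 then 0 else 1)) := by
  simp only [checkingStatsBody, pv_pair_step]
  refine Prod.ext rfl (Prod.ext rfl (Prod.ext rfl (Prod.ext ?_ ?_))) <;> simp <;> split_ifs <;> ring

theorem pv_outer_fold (ps : List (String × String)) (st : Int × Int × Int × Int × Int) :
    ps.foldl checkingStatsBody st
    = (st.1 + (ps.map pvK).sum,
       st.2.1 + (ps.map pvC).sum,
       st.2.2.1 + ((ps.map pvL).sum - (ps.map pvC).sum),
       st.2.2.2.1 + (ps.countP (fun ab => ab.1 == ab.2) : Int),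
       st.2.2.2.2 + ((ps.length : Int) - (ps.countP (fun ab => ab.1 == ab.2) : Int))) := by
  induction ps generalizing st with
  | nil => simp
  | cons p ps ih =>
    rw [List.foldl_cons, pv_body, ih]
    simp only [List.map_cons, List.sum_cons, List.countP_cons, List.length_cons]
    refine Prod.ext ?_ (Prod.ext ?_ (Prod.ext ?_ (Prod.ext ?_ ?_))) <;> simp <;>
      (try split_ifs) <;> ring

-- A = B, as one lemma
theorem pv_eq (wl ir : List String) : checkingStats wl ir = checkingStats_alt wl ir := by
  unfold checkingStats checkingStats_alt
  rw [pv_outer_fold]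
  have hsum : ∀ (g : Char × Char → Int),
      (((wl.zip ir).flatMap (fun ab => ab.1.toList.zip ab.2.toList)).map g).sum
      = ((wl.zip ir).map (fun ab => ((ab.1.toList.zip ab.2.toList).map g).sum)).sum := by
    intro g
    rw [List.map_flatMap, List.flatMap_def, List.sum_flatten, List.map_map]; rfl
  refine Prod.ext ?_ (Prod.ext ?_ (Prod.ext ?_ (Prod.ext ?_ ?_)))
  · simpa [pvK, pvW] using (hsum (fun xy => if PySem.Chars.isupper xy.2 then (2 : Int)
        else if PySem.Chars.islower xy.2 then 1 else 0)).symm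
  · simp only [List.countP_flatMap, Function.comp_def]
    rw [show pvC = (fun x : String × String =>
      ((List.countP (fun xy => xy.1 == xy.2) (x.1.toList.zip x.2.toList) : Nat) : Int)) from rfl]
    push_cast [Nat.cast_list_sum, List.map_map, Function.comp_def]
    ring
  · simp only [List.countP_flatMap, List.length_flatMap, Function.comp_def, List.length_zip,
      String.length_toList]
    rw [show pvC = (fun x : String × String =>
      ((List.countP (fun xy => xy.1 == xy.2) (x.1.toList.zip x.2.toList) : Nat) : Int)) from rfl,
      show pvL = (fun x : String × String => min (x.1.length : Int) (x.2.length : Int)) from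
        funext fun x => by simp [pvL, List.length_zip]]
    push_cast [Nat.cast_list_sum, List.map_map, Function.comp_def, Nat.cast_min]
    ring
  · simp
  · simp

-- ===== VERDICT (by name: the statement is the Claim_ definition above) =====
theorem checkingStats_spec : Claim_equal_checkingStats := by
  intro wl ir _
  exact pv_eq wl ir
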